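-- pv_equiv track=rewrite | github.com/pypi-data/pypi-mirror-143 | packages/steam-sdk/steam_sdk-0.0.23.tar.gz/steam_sdk-0.0.23/steam_sdk/parsers/ParserPSPICE.py | add_transient_time_schedule
-- ===== SOURCE A (Python) =====
-- def add_transient_time_schedule(time_schedule):
--     ''' Format transient time schedule rows '''
--     # If time_schedule is not defined, output will be None
--     if time_schedule == None or len(time_schedule) == 0 or len(time_schedule[0]) == 0:
--         return None
--
--     formatted_text = '+ {SCHEDULE(\n'
--     for t, time_entry in enumerate(time_schedule):
--         time_window_start, time_step_in_window = str(time_entry[0]), str(time_entry[1])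
--         if t+1 == len(time_schedule):
--             formatted_text = formatted_text + '+ ' + time_window_start + ', ' + time_step_in_window + '\n'  # the last entry must not have the comma
--         else:
--             formatted_text = formatted_text + '+ ' + time_window_start + ', ' + time_step_in_window + ',' + '\n'
--     formatted_text = formatted_text + '+)}'
--     return formatted_text
-- ===== SOURCE B (Python) =====
-- def add_transient_time_schedule(time_schedule):
--     ''' Format transient time schedule rows '''
--     # If time_schedule is not defined, output will be None
--     if time_schedule == None or len(time_schedule) == 0 or len(time_schedule[0]) == 0:
--         return None
--     # Build the text back-to-front: start from the closing brace and prepend rows,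
--     # walking the schedule in reverse; the separator flips to ',\n' after the first
--     # (i.e. last) row, so no per-iteration index or last-entry test is needed.
--     tail = '+)}'
--     sep = '\n'
--     for entry in reversed(time_schedule):
--         tail = '+ ' + str(entry[0]) + ', ' + str(entry[1]) + sep + tail
--         sep = ',\n'
--     return '+ {SCHEDULE(\n' + tail
-- ===== Notes on version B (the rewrite author's own statement) =====
-- stated objective: alternative
-- what changed: B builds the output back-to-front: it walks the schedule in reverse, prepending each row to the suffix that starts as '+)}', with a separator state variable that flips after the first (last) row, so A's enumerate index and last-entry comma branch disappear.
import Mathlib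
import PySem

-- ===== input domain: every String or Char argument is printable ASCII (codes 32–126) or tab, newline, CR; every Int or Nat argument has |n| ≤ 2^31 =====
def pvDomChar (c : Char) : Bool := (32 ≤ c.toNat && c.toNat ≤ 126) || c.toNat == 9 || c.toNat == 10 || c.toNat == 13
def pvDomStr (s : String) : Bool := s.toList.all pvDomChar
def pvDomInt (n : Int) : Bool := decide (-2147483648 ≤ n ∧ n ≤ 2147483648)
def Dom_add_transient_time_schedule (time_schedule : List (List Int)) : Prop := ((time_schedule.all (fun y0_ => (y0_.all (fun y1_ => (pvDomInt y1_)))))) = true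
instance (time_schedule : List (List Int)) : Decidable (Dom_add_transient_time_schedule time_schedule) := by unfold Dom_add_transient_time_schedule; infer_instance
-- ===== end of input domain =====

-- B builds the text back-to-front over the reversed schedule with a separator state flag, replacing A's forward enumerate loop and last-entry comma branch (return value only).

-- ===== PORT A =====
-- A's for-loop with its running index t and the `t+1 == len` comma branch; strings as List Char
-- (PySem.Chars side); `time_entry[0]`/`[1]` via pyGetD (default unreachable inside Pre_).
def pvALoop (n : Nat) : Nat → List (List Int) → List Char → List Char
  | _, [], acc => acc
  | t, e :: rest, acc =>
      pvALoop n (t + 1) rest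
        (if t + 1 = n then
          acc ++ "+ ".toList ++ PySem.Int.toChars (PySem.List.pyGetD e 0 0) ++ ", ".toList
            ++ PySem.Int.toChars (PySem.List.pyGetD e 1 0) ++ "\n".toList
        else
          acc ++ "+ ".toList ++ PySem.Int.toChars (PySem.List.pyGetD e 0 0) ++ ", ".toList
            ++ PySem.Int.toChars (PySem.List.pyGetD e 1 0) ++ ",".toList ++ "\n".toList)

def add_transient_time_schedule (time_schedule : List (List Int)) : Option String :=
  match time_schedule with
  | [] => none
  | first :: _ =>
      if first.length = 0 then none
      else
        some (String.ofList
          (pvALoop time_schedule.length 0 time_schedule "+ {SCHEDULE(\n".toList ++ "+)}".toList))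

-- ===== PORT B =====
-- Source B's loop over reversed(time_schedule), state = (tail, sep): each step prepends
-- '+ e0, e1' ++ sep to the tail and sets sep to ',\n'.
def pvBStep (st : List Char × List Char) (e : List Int) : List Char × List Char :=
  ("+ ".toList ++ PySem.Int.toChars (PySem.List.pyGetD e 0 0) ++ ", ".toList
    ++ PySem.Int.toChars (PySem.List.pyGetD e 1 0) ++ st.2 ++ st.1, ",\n".toList)

def add_transient_time_schedule_alt (time_schedule : List (List Int)) : Option String :=
  match time_schedule with
  | [] => none
  | first :: _ =>
      if first.length = 0 then none
      else
        some (String.ofList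
          ("+ {SCHEDULE(\n".toList
            ++ (time_schedule.reverse.foldl pvBStep ("+)}".toList, "\n".toList)).1))

-- ===== PRECONDITION & SPEC =====
-- Pre_ excludes exactly the inputs where Python A raises IndexError: a row with fewer than 2
-- entries, unless the guard already returned None (empty list or empty first row).
def Pre_add_transient_time_schedule (time_schedule : List (List Int)) : Prop :=
  time_schedule = [] ∨ time_schedule.head? = some [] ∨ ∀ e ∈ time_schedule, 2 ≤ e.length

instance (time_schedule : List (List Int)) : Decidable (Pre_add_transient_time_schedule time_schedule) := by
  unfold Pre_add_transient_time_schedule; infer_instance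

def pvWitness_add_transient_time_schedule : List (List Int) := [[0, 1], [2, 3]]

def Spec_add_transient_time_schedule (time_schedule : List (List Int)) (out : Option String) : Prop := out = add_transient_time_schedule_alt time_schedule
instance (time_schedule : List (List Int)) (out : Option String) : Decidable (Spec_add_transient_time_schedule time_schedule out) := by unfold Spec_add_transient_time_schedule; infer_instance

-- ===== CLAIM (what is proved, stated in full; the proofs are below) =====
def Claim_equal_add_transient_time_schedule : Prop := ∀ (time_schedule : List (List Int)), Dom_add_transient_time_schedule time_schedule → Pre_add_transient_time_schedule time_schedule → Spec_add_transient_time_schedule time_schedule (add_transient_time_schedule time_schedule)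

-- ===== LEMMAS AND PROOFS =====

-- The row string both programs produce for one entry.
def pvRow (e : List Int) : List Char :=
  "+ ".toList ++ PySem.Int.toChars (PySem.List.pyGetD e 0 0) ++ ", ".toList
    ++ PySem.Int.toChars (PySem.List.pyGetD e 1 0)

-- A's loop over a nonempty suffix, started at index t with total count t + l.length,
-- produces exactly acc ++ join ",\n" (rows of l) ++ "\n".
theorem pvALoop_eq_join (l : List (List Int)) :
    ∀ (t : Nat) (acc : List Char), l ≠ [] →
      pvALoop (t + l.length) t l acc =
        acc ++ PySem.Chars.join ",\n".toList (l.map pvRow) ++ "\n".toList := by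
  induction l with
  | nil => intro t acc h; exact absurd rfl h
  | cons e rest ih =>
      intro t acc _
      cases rest with
      | nil =>
          simp [pvALoop, pvRow, PySem.Chars.join_singleton]
      | cons f rest' =>
          have hn : t + (e :: f :: rest').length = (t + 1) + (f :: rest').length := by
            simp only [List.length_cons]; omega
          rw [pvALoop, if_neg (by simp only [List.length_cons]; omega), hn,
              ih (t + 1) _ (by simp)]
          simp only [List.map_cons]
          rw [PySem.Chars.join_cons_cons]
          simp [pvRow]

-- B's backward fold over a nonempty list yields tail = join ",\n" rows ++ "\n" ++ "+)}"
-- and leaves sep = ",\n".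
theorem pvBFold_eq_join (l : List (List Int)) (h : l ≠ []) :
    l.reverse.foldl pvBStep ("+)}".toList, "\n".toList) =
      (PySem.Chars.join ",\n".toList (l.map pvRow) ++ "\n".toList ++ "+)}".toList,
       ",\n".toList) := by
  induction l with
  | nil => exact absurd rfl h
  | cons e rest ih =>
      cases rest with
      | nil =>
          simp [pvBStep, pvRow, PySem.Chars.join_singleton]
      | cons f rest' =>
          rw [List.reverse_cons, List.foldl_append, ih (by simp)]
          simp only [List.foldl_cons, List.foldl_nil, List.map_cons, pvBStep]
          rw [PySem.Chars.join_cons_cons]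
          simp [pvRow]

theorem add_transient_time_schedule_spec : Claim_equal_add_transient_time_schedule := by
  intro ts _ _
  unfold Spec_add_transient_time_schedule
  match ts with
  | [] => rfl
  | first :: rest =>
      unfold add_transient_time_schedule add_transient_time_schedule_alt
      by_cases h : first.length = 0
      · simp [h]
      · simp only [h, reduceIte]
        have hA := pvALoop_eq_join (first :: rest) 0 "+ {SCHEDULE(\n".toList (by simp)
        simp only [Nat.zero_add] at hA
        rw [hA, pvBFold_eq_join (first :: rest) (by simp)]
        simp
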